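-- pv_equiv track=rewrite | github.com/DengYijunX/tooltesting | scripts/batch_generate_problems.py | build_topic_list
-- ===== SOURCE A (Python) =====
-- from typing import Dict, List
--
-- DEFAULT_TOPIC_POOLS: Dict[str, List[str]] = {
--     "physics": [
--         "牛顿第二定律",
--         "动能定理",
--         "功和功率",
--         "加速度",
--     ],
--     "psychology": [
--         "遗忘曲线",
--         "经典条件作用",
--         "操作性条件作用",
--         "观察法",
--     ],
-- }
--
-- def build_topic_list(subject: str, custom_topics: List[str], use_default_topics: bool, limit: int) -> List[str]:
--     topics: List[str] = []
--
--     if use_default_topics: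
--         topics.extend(DEFAULT_TOPIC_POOLS.get(subject, []))
--
--     for topic in custom_topics:
--         topic = topic.strip()
--         if topic and topic not in topics:
--             topics.append(topic)
--
--     if limit > 0:
--         topics = topics[:limit]
--
--     return topics
-- ===== SOURCE B (Python) =====
-- from typing import Dict, List, Optional
--
-- DEFAULT_TOPIC_POOLS: Dict[str, List[str]] = {
--     "physics": [
--         "牛顿第二定律",
--         "动能定理",
--         "功和功率",
--         "加速度",
--     ],
--     "psychology": [
--         "遗忘曲线",
--         "经典条件作用",
--         "操作性条件作用",
--         "观察法",
--     ],
-- }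
--
-- def build_topic_list(subject: str, custom_topics: List[str], use_default_topics: bool, limit: int) -> List[str]:
--     # Streaming build with an early-exit budget: the pool is truncated up front and
--     # custom topics are consumed only until the budget runs out — no full list is
--     # ever built and then truncated.
--     pool = DEFAULT_TOPIC_POOLS.get(subject, []) if use_default_topics else []
--     if limit > 0:
--         result = pool[:limit]
--         budget: Optional[int] = limit - len(pool)
--     else:
--         result = list(pool)
--         budget = None
--     seen = list(pool)
--     for raw in custom_topics:
--         if budget is not None and budget <= 0:
--             break
--         t = raw.strip()
--         if t and t not in seen:
--             result.append(t)
--             seen.append(t)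
--             if budget is not None:
--                 budget -= 1
--     return result
-- ===== Notes on version B (the rewrite author's own statement) =====
-- stated objective: alternative
-- what changed: Replaces A's build-everything-then-truncate (extend with the full default pool, dedup-append every stripped custom topic, finally slice to limit) with a streaming build under an early-exit budget: the pool is truncated up front, and the loop over custom topics stops as soon as the remaining budget reaches zero, so no over-long list is ever built and no final slice is taken.
import Mathlib
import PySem

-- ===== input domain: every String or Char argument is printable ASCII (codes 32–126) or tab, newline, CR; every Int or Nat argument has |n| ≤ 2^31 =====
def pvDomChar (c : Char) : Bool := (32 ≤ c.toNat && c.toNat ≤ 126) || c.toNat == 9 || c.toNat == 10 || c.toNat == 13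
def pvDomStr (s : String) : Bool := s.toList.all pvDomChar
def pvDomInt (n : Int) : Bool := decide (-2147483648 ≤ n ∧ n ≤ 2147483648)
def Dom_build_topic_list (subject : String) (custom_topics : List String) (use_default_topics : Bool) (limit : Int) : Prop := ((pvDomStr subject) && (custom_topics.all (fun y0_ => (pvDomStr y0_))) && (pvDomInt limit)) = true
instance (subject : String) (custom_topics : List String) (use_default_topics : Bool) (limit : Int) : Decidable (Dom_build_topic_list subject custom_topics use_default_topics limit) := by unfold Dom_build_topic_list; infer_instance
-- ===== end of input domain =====

-- B streams the custom topics with an early-exit budget (pool truncated up front, loop stops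
-- once the budget is spent) instead of A's build-everything-then-truncate: an alternative
-- decomposition of the same task, same result.

-- ===== PORT A =====
-- module constant DEFAULT_TOPIC_POOLS (shared by both ports, as in the Python module)
def pvDefaultTopicPools : PySem.Dict String (List String) :=
  PySem.Dict.ofList
    [("physics", ["牛顿第二定律", "动能定理", "功和功率", "加速度"]),
     ("psychology", ["遗忘曲线", "经典条件作用", "操作性条件作用", "观察法"])]

def build_topic_list (subject : String) (custom_topics : List String) (use_default_topics : Bool) (limit : Int) : List String :=
  let topics : List String := []
  let topics := if use_default_topics then topics ++ PySem.Dict.getD pvDefaultTopicPools subject [] else topics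
  let topics := custom_topics.foldl (fun topics topic =>
    let topic := PySem.Str.strip topic
    if topic ≠ "" ∧ topic ∉ topics then topics ++ [topic] else topics) topics
  if limit > 0 then PySem.List.slice topics none (some limit) else topics

-- ===== PORT B =====
-- B's for-loop over custom_topics with state (seen, budget); returns the items it appends,
-- breaking as soon as the budget is exhausted (budget = none means unbounded)
def pvCollect (cands : List String) (seen : List String) (budget : Option Int) : List String :=
  match cands with
  | [] => []
  | raw :: rest =>
    if budget.elim false (fun b => decide (b ≤ 0)) then []   -- "if budget is not None and budget <= 0: break"
    else
      let t := PySem.Str.strip raw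
      if t ≠ "" ∧ t ∉ seen then
        t :: pvCollect rest (seen ++ [t]) (budget.map (fun b => b - 1))
      else
        pvCollect rest seen budget

def build_topic_list_alt (subject : String) (custom_topics : List String) (use_default_topics : Bool) (limit : Int) : List String :=
  let pool := if use_default_topics then PySem.Dict.getD pvDefaultTopicPools subject [] else []
  let result := if limit > 0 then PySem.List.slice pool none (some limit) else pool
  let budget : Option Int := if limit > 0 then some (limit - pool.length) else none
  result ++ pvCollect custom_topics pool budget

-- ===== PRECONDITION & SPEC =====
def Spec_build_topic_list (subject : String) (custom_topics : List String) (use_default_topics : Bool) (limit : Int) (out : List String) : Prop := out = build_topic_list_alt subject custom_topics use_default_topics limit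
instance (subject : String) (custom_topics : List String) (use_default_topics : Bool) (limit : Int) (out : List String) : Decidable (Spec_build_topic_list subject custom_topics use_default_topics limit out) := by unfold Spec_build_topic_list; infer_instance

-- ===== CLAIM (what is proved, stated in full; the proofs are below) =====
def Claim_equal_build_topic_list : Prop := ∀ (subject : String) (custom_topics : List String) (use_default_topics : Bool) (limit : Int), Dom_build_topic_list subject custom_topics use_default_topics limit → Spec_build_topic_list subject custom_topics use_default_topics limit (build_topic_list subject custom_topics use_default_topics limit)

-- ===== LEMMAS AND PROOFS =====

-- A's loop step, named for the lemmas
def pvStepA (topics : List String) (topic : String) : List String :=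
  let topic := PySem.Str.strip topic
  if topic ≠ "" ∧ topic ∉ topics then topics ++ [topic] else topics

-- A's fold only ever appends: the accumulator is a prefix of the result
theorem pvFoldA_prefix (xs : List String) (acc : List String) :
    ∃ t, xs.foldl pvStepA acc = acc ++ t := by
  induction xs generalizing acc with
  | nil => exact ⟨[], (List.append_nil acc).symm⟩
  | cons x xs ih =>
    rw [List.foldl_cons]
    by_cases h : PySem.Str.strip x ≠ "" ∧ PySem.Str.strip x ∉ acc
    · obtain ⟨t, ht⟩ := ih (acc ++ [PySem.Str.strip x])
      refine ⟨[PySem.Str.strip x] ++ t, ?_⟩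
      simp only [pvStepA, if_pos h] at ht ⊢
      rw [ht, List.append_assoc]
    · obtain ⟨t, ht⟩ := ih acc
      refine ⟨t, ?_⟩
      simp only [pvStepA, if_neg h]
      exact ht

-- unbounded: A's fold is the accumulator followed by B's collected items
theorem pvFold_eq_collect_none (xs : List String) (acc : List String) :
    xs.foldl pvStepA acc = acc ++ pvCollect xs acc none := by
  induction xs generalizing acc with
  | nil => simp [pvCollect]
  | cons x xs ih =>
    rw [List.foldl_cons]
    by_cases h : PySem.Str.strip x ≠ "" ∧ PySem.Str.strip x ∉ acc
    · simp only [pvStepA, if_pos h]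
      rw [ih]
      simp [pvCollect, h]
    · simp only [pvStepA, if_neg h]
      rw [ih]
      simp [pvCollect, h]

-- bounded: the first n elements of A's fold are acc's first n followed by the
-- budget-limited collection (budget = n - len acc)
theorem pvFold_take_eq_collect (xs : List String) (acc : List String) (n : Nat) :
    (xs.foldl pvStepA acc).take n
      = acc.take n ++ pvCollect xs acc (some ((n : Int) - acc.length)) := by
  induction xs generalizing acc with
  | nil => simp [pvCollect]
  | cons x xs ih =>
    by_cases hb : (n : Int) - (acc.length : Int) ≤ 0
    · -- budget exhausted: n ≤ acc.length; the fold only appends, so take n sees only acc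
      have hcoll : pvCollect (x :: xs) acc (some ((n : Int) - acc.length)) = [] := by
        simp [pvCollect, hb]
      rw [hcoll, List.append_nil]
      obtain ⟨t, ht⟩ := pvFoldA_prefix (x :: xs) acc
      rw [ht, List.take_append_of_le_length (by omega : n ≤ acc.length)]
    · rw [List.foldl_cons]
      by_cases h : PySem.Str.strip x ≠ "" ∧ PySem.Str.strip x ∉ acc
      · have hcoll : pvCollect (x :: xs) acc (some ((n : Int) - acc.length))
            = PySem.Str.strip x
              :: pvCollect xs (acc ++ [PySem.Str.strip x]) (some ((n : Int) - acc.length - 1)) := by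
          simp [pvCollect, hb, h]
        rw [hcoll]
        simp only [pvStepA, if_pos h]
        rw [ih (acc ++ [PySem.Str.strip x])]
        have hacc : acc.take n = acc := List.take_of_length_le (by omega)
        have h1 : (acc ++ [PySem.Str.strip x]).take n = acc ++ [PySem.Str.strip x] :=
          List.take_of_length_le (by simp; omega)
        have h2 : ((n : Int) - ((acc ++ [PySem.Str.strip x]).length : Int))
            = (n : Int) - (acc.length : Int) - 1 := by
          simp; ring
        rw [h1, h2, hacc, List.append_assoc, List.singleton_append]
      · have hcoll : pvCollect (x :: xs) acc (some ((n : Int) - acc.length))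
            = pvCollect xs acc (some ((n : Int) - acc.length)) := by
          simp [pvCollect, hb, h]
        rw [hcoll]
        simp only [pvStepA, if_neg h]
        exact ih acc

-- the whole equivalence over an arbitrary starting pool (both ports reduce to this shape)
theorem pvMain (pool : List String) (custom_topics : List String) (limit : Int) :
    (if limit > 0 then PySem.List.slice (custom_topics.foldl pvStepA pool) none (some limit)
     else custom_topics.foldl pvStepA pool)
    = (if limit > 0 then PySem.List.slice pool none (some limit) else pool)
      ++ pvCollect custom_topics pool
           (if limit > 0 then some (limit - (pool.length : Int)) else none) := by
  by_cases hl : limit > 0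
  · simp only [if_pos hl]
    rw [PySem.List.slice_to _ (by omega), PySem.List.slice_to _ (by omega)]
    rw [pvFold_take_eq_collect custom_topics pool limit.toNat]
    have hcast : ((limit.toNat : Int)) = limit := by omega
    rw [hcast]
  · simp only [if_neg hl]
    exact pvFold_eq_collect_none custom_topics pool

-- ===== VERDICT (by name: the statement is the Claim_ definition above) =====
theorem build_topic_list_spec : Claim_equal_build_topic_list := by
  intro subject custom_topics use_default_topics limit _hdom
  exact pvMain (if use_default_topics then PySem.Dict.getD pvDefaultTopicPools subject [] else [])
    custom_topics limit
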